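-- pv_equiv track=rewrite | github.com/dimistsaousis/coursera | Algorithms & Data Structures Specialisation/Algorithmic Toolbox/week2/fibonacci_last_digit.py | get_fibonacci_last_digit
-- ===== SOURCE A (Python) =====
-- def get_fibonacci_last_digit(n):
--     if n <= 1:
--         return 1
--
--     c_prev = 0
--     c_curr = 1
--     last_digit_sum = 1
--     for i in range(2, n+1):
--         c_prev, c_curr = c_curr, (c_prev + c_curr) % 10
--         last_digit_sum = last_digit_sum + c_curr
--     return last_digit_sum
-- ===== SOURCE B (Python) =====
-- # Pisano period of 10 is 60: the last digits of Fibonacci numbers repeat with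
-- # period 60, so the running sum of last digits is computed in O(1) from a
-- # precomputed prefix-sum table of one period.
-- _PREFIX = [0, 1, 2, 4, 7, 12, 20, 23, 24, 28, 33, 42, 46, 49, 56, 56, 63, 70,
--            74, 75, 80, 86, 87, 94, 102, 107, 110, 118, 119, 128, 128, 137,
--            146, 154, 161, 166, 168, 175, 184, 190, 195, 196, 202, 209, 212,
--            212, 215, 218, 224, 233, 238, 242, 251, 254, 256, 261, 268, 270,
--            279, 280]
-- _PERIOD_SUM = 280
--
--
-- def get_fibonacci_last_digit(n):
--     if n <= 1:
--         return 1
--     q, r = divmod(n, 60)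
--     return q * _PERIOD_SUM + _PREFIX[r]
-- ===== Notes on version B (the rewrite author's own statement) =====
-- stated objective: faster
-- what changed: Replaces the O(n) loop over all Fibonacci last digits by an O(1) closed form using the Pisano period 60: a precomputed 60-entry prefix-sum table plus divmod(n, 60).
import Mathlib
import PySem

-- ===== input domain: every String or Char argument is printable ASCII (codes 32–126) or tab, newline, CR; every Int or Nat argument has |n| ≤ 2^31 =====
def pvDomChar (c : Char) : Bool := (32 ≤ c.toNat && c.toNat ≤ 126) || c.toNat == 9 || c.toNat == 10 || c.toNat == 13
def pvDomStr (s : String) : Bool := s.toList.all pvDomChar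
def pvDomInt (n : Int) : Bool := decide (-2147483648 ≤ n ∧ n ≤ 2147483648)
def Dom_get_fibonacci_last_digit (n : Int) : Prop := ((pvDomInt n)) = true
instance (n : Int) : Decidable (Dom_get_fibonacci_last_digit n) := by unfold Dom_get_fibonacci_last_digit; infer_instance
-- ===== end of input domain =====

-- B replaces A's O(n) loop by an O(1) closed form: Fibonacci last digits repeat
-- with the Pisano period 60, so the sum is q * 280 + prefix[r] for n = 60*q + r.

-- ===== PORT A =====
def get_fibonacci_last_digit (n : Int) : Int :=
  if n ≤ 1 then 1
  else
    ((PySem.List.pyRange 2 (n + 1) 1).foldl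
      (fun st _ =>
        (st.2.1, PySem.Int.mod (st.1 + st.2.1) 10,
          st.2.2 + PySem.Int.mod (st.1 + st.2.1) 10))
      (0, 1, 1)).2.2

-- ===== PORT B =====
-- prefix sums of the last digits of F_1..F_r over one Pisano period (r = 0..59)
def pvPrefix : List Int :=
  [0, 1, 2, 4, 7, 12, 20, 23, 24, 28, 33, 42, 46, 49, 56, 56, 63, 70,
   74, 75, 80, 86, 87, 94, 102, 107, 110, 118, 119, 128, 128, 137,
   146, 154, 161, 166, 168, 175, 184, 190, 195, 196, 202, 209, 212,
   212, 215, 218, 224, 233, 238, 242, 251, 254, 256, 261, 268, 270,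
   279, 280]

def get_fibonacci_last_digit_alt (n : Int) : Int :=
  if n ≤ 1 then 1
  else
    PySem.Int.floordiv n 60 * 280 + PySem.List.pyGetD pvPrefix (PySem.Int.mod n 60) 0

-- ===== PRECONDITION & SPEC =====
def Spec_get_fibonacci_last_digit (n : Int) (out : Int) : Prop := out = get_fibonacci_last_digit_alt n
instance (n : Int) (out : Int) : Decidable (Spec_get_fibonacci_last_digit n out) := by unfold Spec_get_fibonacci_last_digit; infer_instance

-- ===== CLAIM (what is proved, stated in full; the proofs are below) =====
def Claim_equal_get_fibonacci_last_digit : Prop := ∀ (n : Int), Dom_get_fibonacci_last_digit n → Spec_get_fibonacci_last_digit n (get_fibonacci_last_digit n)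

-- ===== LEMMAS AND PROOFS =====

-- Fibonacci last-digit pair (F_k % 10, F_{k+1} % 10) and prefix sums, on Nat
def fpStep (p : Nat × Nat) : Nat × Nat := (p.2, (p.1 + p.2) % 10)
def fp (k : Nat) : Nat × Nat := fpStep^[k] (0, 1)

def Sd : Nat → Nat
  | 0 => 0
  | k + 1 => Sd k + (fp k).2

-- A's loop body, as a step function on Int triples
def stepA (st : Int × Int × Int) : Int × Int × Int :=
  (st.2.1, PySem.Int.mod (st.1 + st.2.1) 10,
    st.2.2 + PySem.Int.mod (st.1 + st.2.1) 10)

lemma portA_foldl (l : List Int) (st : Int × Int × Int) :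
    l.foldl
      (fun st _ =>
        (st.2.1, PySem.Int.mod (st.1 + st.2.1) 10,
          st.2.2 + PySem.Int.mod (st.1 + st.2.1) 10))
      st = stepA^[l.length] st := by
  induction l generalizing st with
  | nil => rfl
  | cons x xs ih =>
      simp only [List.foldl_cons, List.length_cons, Function.iterate_succ_apply]
      exact ih (stepA st)

lemma fp_succ (k : Nat) : fp (k + 1) = fpStep (fp k) := by
  simp [fp, Function.iterate_succ_apply']

lemma fp_add60 (k : Nat) : fp (k + 60) = fp k := by
  have h60 : fpStep^[60] ((0 : Nat), (1 : Nat)) = (0, 1) := by decide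
  show fpStep^[k + 60] (0, 1) = fpStep^[k] (0, 1)
  rw [Function.iterate_add_apply, h60]

lemma Sd_add60 (m : Nat) : Sd (m + 60) = Sd m + 280 := by
  induction m with
  | zero => decide
  | succ m ih =>
      have : m + 1 + 60 = (m + 60) + 1 := by omega
      rw [this]
      show Sd (m + 60) + (fp (m + 60)).2 = (Sd m + (fp m).2) + 280
      rw [ih, fp_add60]; omega

lemma Sd_split (q r : Nat) : Sd (60 * q + r) = 280 * q + Sd r := by
  induction q with
  | zero => simp
  | succ q ih =>
      have : 60 * (q + 1) + r = (60 * q + r) + 60 := by ring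
      rw [this, Sd_add60, ih]; ring

-- loop invariant: A's state after k iterations
lemma stepA_invariant (k : Nat) :
    stepA^[k] ((0 : Int), (1 : Int), (1 : Int)) =
      (((fp k).1 : Int), ((fp k).2 : Int), ((Sd (k + 1) : Nat) : Int)) := by
  induction k with
  | zero => decide
  | succ k ih =>
      rw [Function.iterate_succ_apply', ih]
      have hmod : PySem.Int.mod (((fp k).1 : Int) + ((fp k).2 : Int)) 10 =
          ((((fp k).1 + (fp k).2) % 10 : Nat) : Int) := by
        rw [← Nat.cast_add]
        exact_mod_cast PySem.Int.mod_natCast ((fp k).1 + (fp k).2) 10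
      simp only [stepA, hmod, fp_succ, fpStep, Sd, Prod.mk.injEq]
      refine ⟨trivial, trivial, ?_⟩
      push_cast; ring

lemma pvPrefix_getD (m : Nat) (hm : m < 60) :
    PySem.List.pyGetD pvPrefix (m : Int) 0 = ((Sd m : Nat) : Int) := by
  revert hm
  revert m
  decide

-- ===== VERDICT (by name: the statement is the Claim_ definition above) =====
theorem get_fibonacci_last_digit_spec : Claim_equal_get_fibonacci_last_digit := by
  intro n _
  unfold Spec_get_fibonacci_last_digit get_fibonacci_last_digit get_fibonacci_last_digit_alt
  split_ifs with h
  · rfl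
  · have h2 : (2 : Int) ≤ n := by omega
    -- A's side: the loop computes Sd n.toNat
    rw [portA_foldl, PySem.List.length_pyRange_one]
    have hlen : ((n + 1) - 2).toNat = n.toNat - 1 := by omega
    rw [hlen, stepA_invariant]
    have hsub : n.toNat - 1 + 1 = n.toNat := by omega
    rw [hsub]
    -- B's side
    rw [PySem.Int.floordiv_eq_ediv_of_pos (by norm_num),
      PySem.Int.mod_eq_emod_of_pos (by norm_num)]
    have hq : n / 60 = ((n.toNat / 60 : Nat) : Int) := by omega
    have hr : n % 60 = ((n.toNat % 60 : Nat) : Int) := by omega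
    rw [hq, hr, pvPrefix_getD (n.toNat % 60) (Nat.mod_lt _ (by omega))]
    show ((Sd n.toNat : Nat) : Int) = _
    have : Sd n.toNat = 280 * (n.toNat / 60) + Sd (n.toNat % 60) := by
      conv_lhs => rw [← Nat.div_add_mod n.toNat 60]
      exact Sd_split _ _
    simp only [this]
    push_cast
    ring
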